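-- pv_equiv track=rewrite | github.com/futurulus/rl-cards | reflex.py | sanitize_pred
-- ===== SOURCE A (Python) =====
-- def sanitize_pred(p):
--     '''
--     >>> sanitize_pred(['top', 'left', '</s>', '<unk>'])
--     ['<s>', 'top', 'left', '</s>']
--     >>> sanitize_pred(['<s>', 'in', 'the', 'corner'])
--     ['<s>', 'in', 'the', 'corner', '</s>']
--     >>> sanitize_pred(['<s>', 'top', '<s>', 'left', '<MASK>', '</s>', 'corner', '<MASK>'])
--     ['<s>', 'top', 'left', '</s>']
--     '''
--     result = ['<s>']
--     start = (1 if p and p[0] == '<s>' else 0)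
--     for token in p[start:]:
--         if token not in ['<MASK>', '<s>']:
--             result.append(token)
--         if token == '</s>':
--             break
--     if result[-1] != '</s>':
--         result.append('</s>')
--     return result
-- ===== SOURCE B (Python) =====
-- def sanitize_pred(p):
--     end = p.index('</s>') if '</s>' in p else len(p)
--     body = [t for t in p[:end] if t not in ('<MASK>', '<s>')]
--     return ['<s>'] + body + ['</s>']
-- ===== Notes on version B (the rewrite author's own statement) =====
-- stated objective: simpler
-- what changed: Replaces the accumulate-with-early-break loop and the trailing last-element fixup by locating the first '</s>' up front, then a single slice-and-filter pass that always wraps the body in '<s>' ... '</s>'.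
import Mathlib
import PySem

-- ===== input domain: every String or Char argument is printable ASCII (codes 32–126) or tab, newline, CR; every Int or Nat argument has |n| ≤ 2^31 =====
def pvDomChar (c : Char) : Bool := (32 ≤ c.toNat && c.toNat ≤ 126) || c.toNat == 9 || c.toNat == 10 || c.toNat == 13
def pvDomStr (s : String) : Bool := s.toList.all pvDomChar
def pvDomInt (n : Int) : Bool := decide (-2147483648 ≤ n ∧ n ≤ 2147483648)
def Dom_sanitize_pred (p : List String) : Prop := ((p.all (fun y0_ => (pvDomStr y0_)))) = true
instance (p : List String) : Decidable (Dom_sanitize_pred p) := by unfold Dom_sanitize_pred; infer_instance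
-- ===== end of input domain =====

-- B locates the first '</s>' up front and does one slice-and-filter pass, instead of A's
-- accumulate-with-early-break loop with a trailing fixup; same result, simpler decomposition.


-- ===== PORT A =====
-- the for-loop with early break, over accumulator `result`
def sanitizeLoopA (acc : List String) : List String → List String
  | [] => acc
  | t :: ts =>
    let acc' := if !(t == "<MASK>" || t == "<s>") then acc ++ [t] else acc
    if t == "</s>" then acc' else sanitizeLoopA acc' ts

def sanitize_pred (p : List String) : List String :=
  let start : Nat := if !p.isEmpty && p.headI == "<s>" then 1 else 0   -- 1 if p and p[0] == '<s>' else 0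
  let result := sanitizeLoopA ["<s>"] (p.drop start)   -- p[start:] with 0 ≤ start ≤ len p is drop
  if result.getLast? ≠ some "</s>" then result ++ ["</s>"] else result

-- ===== PORT B =====
def sanitize_pred_alt (p : List String) : List String :=
  let e : Nat := match PySem.List.index? p "</s>" with   -- p.index('</s>') if '</s>' in p else len(p)
    | some i => i
    | none => p.length
  let body := (p.take e).filter (fun t => !(t == "<MASK>" || t == "<s>"))
  "<s>" :: body ++ ["</s>"]

-- ===== PRECONDITION & SPEC =====
def Spec_sanitize_pred (p : List String) (out : List String) : Prop := out = sanitize_pred_alt p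
instance (p : List String) (out : List String) : Decidable (Spec_sanitize_pred p out) := by unfold Spec_sanitize_pred; infer_instance

-- ===== CLAIM (what is proved, stated in full; the proofs are below) =====
def Claim_equal_sanitize_pred : Prop := ∀ (p : List String), Dom_sanitize_pred p → Spec_sanitize_pred p (sanitize_pred p)

-- ===== LEMMAS AND PROOFS =====

-- B's cut `p.take e` is the prefix of p before the first '</s>'
theorem take_index_eq_takeWhile (p : List String) :
    p.take (match PySem.List.index? p "</s>" with | some i => i | none => p.length)
      = p.takeWhile (fun t => !(t == "</s>")) := by
  induction p with
  | nil => simp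
  | cons x xs ih =>
    by_cases hx : x = "</s>"
    · subst hx
      rw [PySem.List.index?_cons_self]
      simp
    · rw [PySem.List.index?_cons_of_ne xs hx]
      cases h : PySem.List.index? xs "</s>" with
      | some i =>
        rw [h] at ih
        simp [hx, ih]
      | none =>
        rw [h] at ih
        simp [hx, ih]

-- characterisation of A's loop
theorem sanitizeLoopA_eq (l acc : List String) :
    sanitizeLoopA acc l =
      acc ++ (l.takeWhile (fun t => !(t == "</s>"))).filter (fun t => !(t == "<MASK>" || t == "<s>"))
          ++ (if "</s>" ∈ l then ["</s>"] else []) := by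
  induction l generalizing acc with
  | nil => simp [sanitizeLoopA]
  | cons t ts ih =>
    by_cases ht : t = "</s>"
    · subst ht
      simp [sanitizeLoopA]
    · simp only [sanitizeLoopA, List.takeWhile_cons]
      rw [if_neg (by simpa using ht)]
      rw [ih]
      by_cases hf : (!(t == "<MASK>" || t == "<s>")) = true
      · have hf2 : ¬t = "<MASK>" ∧ ¬t = "<s>" := by simpa using hf
        have ht' : ¬("</s>" = t) := fun h => ht h.symm
        simp [hf2.1, hf2.2, ht', ht, List.append_assoc]
      · have hf2 : t = "<MASK>" ∨ t = "<s>" := by by_contra hc; rw [not_or] at hc; simp [hc.1, hc.2] at hf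
        have ht' : ¬("</s>" = t) := fun h => ht h.symm
        rcases hf2 with h2 | h2 <;> subst h2 <;> simp_all [List.append_assoc]

theorem not_mem_filtered (l : List String) :
    "</s>" ∉ (l.takeWhile (fun t => !(t == "</s>"))).filter (fun t => !(t == "<MASK>" || t == "<s>")) := by
  intro h
  have h1 := List.mem_of_mem_filter h
  have h2 := List.mem_takeWhile_imp h1
  simp at h2

-- A, on any token list l, produces '<s>' :: (filtered prefix before first '</s>') ++ ['</s>']
theorem A_core (l : List String) :
    (if (sanitizeLoopA ["<s>"] l).getLast? ≠ some "</s>" then sanitizeLoopA ["<s>"] l ++ ["</s>"]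
     else sanitizeLoopA ["<s>"] l)
      = "<s>" :: (l.takeWhile (fun t => !(t == "</s>"))).filter (fun t => !(t == "<MASK>" || t == "<s>")) ++ ["</s>"] := by
  simp only [sanitizeLoopA_eq]
  by_cases hm : "</s>" ∈ l
  · simp only [hm, if_pos]
    rw [List.cons_append, if_neg]
    · simp
    · rw [List.getLast?_concat]
      simp
  · simp only [hm, if_false]
    rw [if_pos]
    · simp
    · intro h
      have hmem : "</s>" ∈ ("<s>" :: (l.takeWhile (fun t => !(t == "</s>"))).filter (fun t => !(t == "<MASK>" || t == "<s>")) : List String) := by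
        have := List.mem_of_getLast? h
        simpa using this
      rcases List.mem_cons.mp hmem with h1 | h1
      · exact absurd h1.symm (by decide)
      · exact not_mem_filtered l h1

-- ===== VERDICT (by name: the statement is the Claim_ definition above) =====
theorem sanitize_pred_spec : Claim_equal_sanitize_pred := by
  intro p _
  show sanitize_pred p = sanitize_pred_alt p
  simp only [sanitize_pred, sanitize_pred_alt]
  rw [take_index_eq_takeWhile]
  cases p with
  | nil => decide
  | cons t ts =>
    by_cases ht : t = "<s>"
    · subst ht
      simp only [List.isEmpty_cons, Bool.not_false, List.headI_cons, beq_self_eq_true,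
        Bool.and_true, if_pos, List.drop_succ_cons, List.drop_zero]
      rw [A_core]
      simp
    · simp only [List.isEmpty_cons, Bool.not_false, Bool.true_and, List.headI_cons]
      rw [if_neg (by simp [ht] : ¬((t == "<s>") = true)), List.drop_zero, A_core]
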